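-- pv_equiv track=rewrite | github.com/FanchenBao/leetcode | LeetCode_2511.py | captureForts
-- ===== SOURCE A (Python) =====
-- from typing import List
--
-- def captureForts(forts: List[int]) -> int:
--     """Some medium problems are harder than this one.
--
--     O(N), 27 ms, faster than 91.67%
--     """
--     res = 0
--     pre = None
--     for i in range(len(forts)):
--         if forts[i]:
--             if pre and forts[i] != pre[0]:
--                 res = max(res, i - pre[1] - 1)
--             pre = (forts[i], i)
--     return res
-- ===== SOURCE B (Python) =====
-- def captureForts(forts):
--     # Run-length encode the array, then scan triples of runs: a zero run
--     # flanked by runs of two different (nonzero) values is a candidate.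
--     runs = []
--     for v in forts:
--         if runs and runs[-1][0] == v:
--             runs[-1] = (v, runs[-1][1] + 1)
--         else:
--             runs.append((v, 1))
--     best = 0
--     for (a, _), (b, cnt), (c, _) in zip(runs, runs[1:], runs[2:]):
--         if b == 0 and a != c:
--             best = max(best, cnt)
--     return best
-- ===== Notes on version B (the rewrite author's own statement) =====
-- stated objective: alternative
-- what changed: Instead of A's stateful index scan carrying the previous nonzero (value, index), B run-length encodes the array into (value, count) runs and takes the maximum count over zero runs whose two neighbouring runs have different values.
import Mathlib
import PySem

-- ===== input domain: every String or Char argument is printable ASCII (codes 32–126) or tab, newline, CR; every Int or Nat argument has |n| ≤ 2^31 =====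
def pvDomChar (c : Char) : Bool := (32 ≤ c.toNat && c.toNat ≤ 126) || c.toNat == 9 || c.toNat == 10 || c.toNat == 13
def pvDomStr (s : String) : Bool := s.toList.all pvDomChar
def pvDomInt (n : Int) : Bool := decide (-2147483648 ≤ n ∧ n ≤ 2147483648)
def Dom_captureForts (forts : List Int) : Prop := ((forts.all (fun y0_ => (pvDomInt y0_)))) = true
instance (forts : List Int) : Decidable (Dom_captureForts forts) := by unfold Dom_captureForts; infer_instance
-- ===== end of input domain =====

-- B replaces A's stateful index scan (previous nonzero value+index) by run-length
-- encoding into (value, count) runs and scanning triples of runs; same O(n) cost.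

-- ===== PORT A =====
-- step of A's loop body: state = (res, pre), pre = Some (value, index) as in the Python
def captureFortsStep (forts : List Int) (st : Int × Option (Int × Int)) (i : Int) :
    Int × Option (Int × Int) :=
  let v := PySem.List.pyGetD forts i 0
  if v ≠ 0 then
    (match st.2 with
     | some pv => (if v ≠ pv.1 then max st.1 (i - pv.2 - 1) else st.1, some (v, i))
     | none => (st.1, some (v, i)))
  else st

def captureForts (forts : List Int) : Int :=
  ((PySem.List.pyRange 0 forts.length 1).foldl (captureFortsStep forts)
    (0, (none : Option (Int × Int)))).1

-- ===== PORT B =====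
-- first loop of Source B: extend the last run or append a new one
def rleStep (runs : List (Int × Int)) (v : Int) : List (Int × Int) :=
  match runs.getLast? with
  | some p => if p.1 = v then runs.dropLast ++ [(v, p.2 + 1)] else runs ++ [(v, 1)]
  | none => [(v, 1)]

-- second loop of Source B: one zipped triple of adjacent runs ((a,_),(b,cnt),(c,_))
def tripStep (best : Int) (t : (Int × Int) × (Int × Int) × (Int × Int)) : Int :=
  if t.2.1.1 == 0 && t.1.1 != t.2.2.1 then max best t.2.1.2 else best

def captureForts_alt (forts : List Int) : Int :=
  let runs := forts.foldl rleStep []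
  (runs.zip ((runs.drop 1).zip (runs.drop 2))).foldl tripStep 0

-- ===== PRECONDITION & SPEC =====
def Spec_captureForts (forts : List Int) (out : Int) : Prop := out = captureForts_alt forts
instance (forts : List Int) (out : Int) : Decidable (Spec_captureForts forts out) := by unfold Spec_captureForts; infer_instance

-- ===== CLAIM (what is proved, stated in full; the proofs are below) =====
def Claim_equal_captureForts : Prop := ∀ (forts : List Int), Dom_captureForts forts → Spec_captureForts forts (captureForts forts)

-- ===== LEMMAS AND PROOFS =====

-- A's loop re-expressed as a fold over enumerate (pairs (index, value))
def aStep (st : Int × Option (Int × Int)) (p : Int × Int) : Int × Option (Int × Int) :=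
  if p.2 ≠ 0 then
    (match st.2 with
     | some pv => (if p.2 ≠ pv.1 then max st.1 (p.1 - pv.2 - 1) else st.1, some (p.2, p.1))
     | none => (st.1, some (p.2, p.1)))
  else st

-- common intermediate spec: g l v z best = scan l, v = last nonzero value, z = zeros since
def gScan : List Int → Int → Int → Int → Int
  | [], _, _, best => best
  | w :: l, v, z, best =>
      if w = 0 then gScan l v (z + 1) best
      else gScan l w 0 (if w ≠ v then max best z else best)

-- before any nonzero has been seen
def gScan0 : List Int → Int → Int
  | [], best => best
  | w :: l, best => if w = 0 then gScan0 l best else gScan l w 0 best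

-- structural run-length encoding: grp a k l = runs of (a repeated k times) ++ l
def grp : Int → Int → List Int → List (Int × Int)
  | a, k, [] => [(a, k)]
  | a, k, x :: l => if x = a then grp a (k + 1) l else (a, k) :: grp x 1 l

-- B's triple loop as a structural recursion over the runs list
def tscan : List (Int × Int) → Int → Int
  | r0 :: r1 :: r2 :: rest, best =>
      tscan (r1 :: r2 :: rest) (if r1.1 == 0 && r0.1 != r2.1 then max best r1.2 else best)
  | _, best => best

theorem fold_range_eq (forts : List Int) :
    (PySem.List.pyRange 0 forts.length 1).foldl (captureFortsStep forts)
      (0, (none : Option (Int × Int)))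
    = (PySem.List.enumerate forts 0).foldl aStep (0, none) := by
  rw [PySem.List.enumerate_eq_map_pyRange forts 0, List.foldl_map]
  rfl

theorem aFold_some (l : List Int) : ∀ (i res v j : Int),
    ((PySem.List.enumerate l i).foldl aStep (res, some (v, j))).1
      = gScan l v (i - j - 1) res := by
  induction l with
  | nil => intro i res v j; simp [PySem.List.enumerate, gScan]
  | cons w l ih =>
    intro i res v j
    rw [PySem.List.enumerate_cons]
    by_cases hw : w = 0
    · simp only [List.foldl_cons, aStep, hw]
      simp only [ne_eq, not_true_eq_false, if_false]
      rw [ih (i + 1) res v j, gScan, if_pos rfl]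
      congr 1; ring
    · have hstep : aStep (res, some (v, j)) (i, w)
          = (if w ≠ v then max res (i - j - 1) else res, some (w, i)) := by
        simp [aStep, hw]
      simp only [List.foldl_cons, hstep]
      rw [ih (i + 1) _ w i, gScan, if_neg hw]
      congr 1; ring

theorem aFold_none (l : List Int) : ∀ (i res : Int),
    ((PySem.List.enumerate l i).foldl aStep (res, none)).1 = gScan0 l res := by
  induction l with
  | nil => intro i res; simp [PySem.List.enumerate, gScan0]
  | cons w l ih =>
    intro i res
    rw [PySem.List.enumerate_cons]
    by_cases hw : w = 0
    · simp only [List.foldl_cons, aStep, hw]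
      simp only [ne_eq, not_true_eq_false, if_false]
      rw [ih (i + 1) res, gScan0, if_pos rfl]
    · have hstep : aStep (res, none) (i, w) = (res, some (w, i)) := by
        simp [aStep, hw]
      simp only [List.foldl_cons, hstep]
      rw [aFold_some l (i + 1) res w i, gScan0, if_neg hw]
      congr 1; ring

theorem captureForts_eq_gScan0 (forts : List Int) :
    captureForts forts = gScan0 forts 0 := by
  unfold captureForts
  rw [fold_range_eq, aFold_none]

-- B side --------------------------------------------------------------------

theorem rle_foldl (l : List Int) : ∀ (rs : List (Int × Int)) (a k : Int),
    l.foldl rleStep (rs ++ [(a, k)]) = rs ++ grp a k l := by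
  induction l with
  | nil => intro rs a k; simp [grp]
  | cons x l ih =>
    intro rs a k
    by_cases hx : x = a
    · have hstep : rleStep (rs ++ [(a, k)]) x = rs ++ [(a, k + 1)] := by
        simp [rleStep, hx]
      rw [List.foldl_cons, hstep, ih rs a (k + 1), grp, if_pos hx]
    · have hax : a ≠ x := fun h => hx h.symm
      have hstep : rleStep (rs ++ [(a, k)]) x = (rs ++ [(a, k)]) ++ [(x, 1)] := by
        simp [rleStep, hax]
      rw [List.foldl_cons, hstep, ih (rs ++ [(a, k)]) x 1, grp,
        if_neg hx, List.append_assoc]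
      rfl

theorem grp_head (l : List Int) : ∀ (a k : Int), ∃ m t, grp a k l = (a, m) :: t := by
  induction l with
  | nil => intro a k; exact ⟨k, [], rfl⟩
  | cons x l ih =>
    intro a k
    by_cases hx : x = a
    · obtain ⟨m, t, h⟩ := ih a (k + 1)
      exact ⟨m, t, by rw [grp, if_pos hx, h]⟩
    · exact ⟨k, grp x 1 l, by rw [grp, if_neg hx]⟩

theorem zip_trip_eq_tscan (rs : List (Int × Int)) : ∀ (best : Int),
    (rs.zip ((rs.drop 1).zip (rs.drop 2))).foldl tripStep best = tscan rs best := by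
  induction rs with
  | nil => intro best; simp [tscan]
  | cons r0 rs ih =>
    intro best
    match rs with
    | [] => simp [tscan]
    | [r1] => simp [tscan]
    | r1 :: r2 :: rest =>
      have := ih best
      simp only [List.drop, List.zip_cons_cons, List.foldl_cons]
      rw [tscan]
      have h2 : ((r1 :: r2 :: rest).zip ((r2 :: rest).zip rest)).foldl tripStep
          (tripStep best (r0, r1, r2)) = tscan (r1 :: r2 :: rest) (tripStep best (r0, r1, r2)) := by
        have := ih (tripStep best (r0, r1, r2))
        simpa using this
      simpa [tripStep] using h2

-- main correspondence: tscan over a run in progress = gScan, with a previous run present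
theorem tscan_grp (l : List Int) : ∀ (p kp c k best : Int), p ≠ c → 0 ≤ best →
    tscan ((p, kp) :: grp c k l) best
      = (if c = 0 then gScan l p k best else gScan l c 0 best) := by
  induction l with
  | nil =>
    intro p kp c k best _ _
    simp [grp, tscan, gScan]
  | cons x l ih =>
    intro p kp c k best hpc hb
    by_cases hx : x = c
    · subst hx
      rw [grp, if_pos rfl, ih p kp x (k + 1) best hpc hb]
      by_cases hc : x = 0
      · subst hc; simp [gScan]
      · rw [if_neg hc, if_neg hc, gScan, if_neg hc]
        simp
    · rw [grp, if_neg hx]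
      obtain ⟨m, t, hgrp⟩ := grp_head l x 1
      rw [hgrp, tscan, ← hgrp]
      by_cases hc : c = 0
      · subst hc
        have hx0 : x ≠ 0 := hx
        have hb' : (0 : Int) ≤ if ((0 : Int) == 0) && (p != x) then max best k else best := by
          split_ifs <;> omega
        rw [ih 0 k x 1 _ (Ne.symm hx0) hb', if_neg hx0, if_pos rfl, gScan, if_neg hx0]
        congr 1
        by_cases hpx : p = x
        · simp [hpx]
        · have hxp : x ≠ p := fun h => hpx h.symm
          simp [hpx, hxp]
      · have hcond : (if ((c : Int) == 0) && (p != x) then max best k else best) = best := by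
          simp [hc]
        rw [hcond, ih c k x 1 best (Ne.symm hx) hb, if_neg hc, gScan]
        by_cases hx0 : x = 0
        · subst hx0; rw [if_pos rfl, if_pos rfl]; norm_num
        · rw [if_neg hx0, if_neg hx0]
          congr 1
          rw [if_pos hx]
          omega

-- top of the runs list: the first run has no left neighbour
theorem tscan_grp_top (l : List Int) : ∀ (c k best : Int), 0 ≤ best →
    tscan (grp c k l) best = (if c = 0 then gScan0 l best else gScan l c 0 best) := by
  induction l with
  | nil =>
    intro c k best _
    simp [grp, tscan, gScan, gScan0]
  | cons x l ih =>
    intro c k best hb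
    by_cases hx : x = c
    · subst hx
      rw [grp, if_pos rfl, ih x (k + 1) best hb]
      by_cases hc : x = 0
      · subst hc; rw [if_pos rfl, if_pos rfl, gScan0, if_pos rfl]
      · rw [if_neg hc, if_neg hc, gScan, if_neg hc]
        simp
    · rw [grp, if_neg hx, tscan_grp l c k x 1 best (Ne.symm hx) hb]
      by_cases hc : c = 0
      · subst hc
        have hx0 : x ≠ 0 := hx
        rw [if_neg hx0, if_pos rfl, gScan0, if_neg hx0]
      · rw [if_neg hc, gScan]
        by_cases hx0 : x = 0
        · subst hx0; rw [if_pos rfl, if_pos rfl]; norm_num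
        · rw [if_neg hx0, if_neg hx0]
          congr 1
          rw [if_pos hx]
          omega

theorem captureForts_alt_eq_gScan0 (forts : List Int) :
    captureForts_alt forts = gScan0 forts 0 := by
  unfold captureForts_alt
  match forts with
  | [] => rfl
  | v :: rest =>
    have h0 : (v :: rest).foldl rleStep [] = grp v 1 rest := by
      rw [List.foldl_cons]
      have : rleStep [] v = [] ++ [(v, 1)] := by simp [rleStep]
      rw [this, rle_foldl rest [] v 1]
      rfl
    simp only [h0]
    rw [zip_trip_eq_tscan, tscan_grp_top rest v 1 0 le_rfl]
    by_cases hv : v = 0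
    · subst hv; rw [if_pos rfl, gScan0, if_pos rfl]
    · rw [if_neg hv, gScan0, if_neg hv]

-- ===== VERDICT (by name: the statement is the Claim_ definition above) =====
theorem captureForts_spec : Claim_equal_captureForts := by
  intro forts _
  unfold Spec_captureForts
  rw [captureForts_eq_gScan0, captureForts_alt_eq_gScan0]
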